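-- pv_equiv track=rewrite | github.com/zafrem/pii-pattern-engine | update_yaml.py | strip_markers
-- ===== SOURCE A (Python) =====
-- def strip_markers(s):
--     # s is the value part of a YAML line, e.g., "'\\b[0-9]+\\b'" or "\\b[0-9]+\\b"
--     s = s.strip()
--     if not s:
--         return s
--
--     # Detect original quotes
--     quote = None
--     if s.startswith("'") and s.endswith("'"):
--         quote = "'"
--         content = s[1:-1]
--     elif s.startswith('"') and s.endswith('"'):
--         quote = '"'
--         content = s[1:-1]
--     else:
--         content = s
--
--     # Strip markers
--     while True:
--         if content.startswith('\\b'):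
--             content = content[2:]
--         elif content.startswith('^'):
--             content = content[1:]
--         else:
--             break
--     while True:
--         if content.endswith('\\b'):
--             content = content[:-2]
--         elif content.endswith('$'):
--             content = content[:-1]
--         else:
--             break
--
--     if quote:
--         return f"{quote}{content}{quote}"
--     else:
--         # If it was unquoted, check if it needs quoting now.
--         # YAML values starting with [, {, *, &, !, |, >, -, ?, :, @, `, % are special.
--         if any(content.startswith(c) for c in ['[', '{', '*', '&', '!', '|', '>', '-', '?', ':', '@', '`', '%']):
--             return f"'{content}'"
--         return content
-- ===== SOURCE B (Python) =====
-- def strip_markers(s):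
--     # Two index pointers instead of repeated slicing: find the first index i past
--     # the leading markers and the last index j before the trailing markers, then
--     # slice once.
--     s = s.strip()
--     if not s:
--         return s
--     if s[0] in "'\"" and s[0] == s[-1]:
--         quote, content = s[0], s[1:-1]
--     else:
--         quote, content = '', s
--     i, j = 0, len(content)
--     while True:
--         if content.startswith('\\b', i):
--             i += 2
--         elif content.startswith('^', i):
--             i += 1
--         else:
--             break
--     while True:
--         if j - i >= 2 and content[j-2:j] == '\\b':
--             j -= 2
--         elif j - i >= 1 and content[j-1] == '$':
--             j -= 1
--         else:
--             break
--     content = content[i:j]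
--     if quote:
--         return quote + content + quote
--     if content and content[0] in "[{*&!|>-?:@`%":
--         return "'" + content + "'"
--     return content
-- ===== Notes on version B (the rewrite author's own statement) =====
-- stated objective: alternative
-- what changed: A peels markers by repeatedly re-slicing the string (one new string per stripped marker); B moves two index pointers over the unchanged string to find the boundary of the leading and trailing marker runs and slices exactly once.
import Mathlib
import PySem

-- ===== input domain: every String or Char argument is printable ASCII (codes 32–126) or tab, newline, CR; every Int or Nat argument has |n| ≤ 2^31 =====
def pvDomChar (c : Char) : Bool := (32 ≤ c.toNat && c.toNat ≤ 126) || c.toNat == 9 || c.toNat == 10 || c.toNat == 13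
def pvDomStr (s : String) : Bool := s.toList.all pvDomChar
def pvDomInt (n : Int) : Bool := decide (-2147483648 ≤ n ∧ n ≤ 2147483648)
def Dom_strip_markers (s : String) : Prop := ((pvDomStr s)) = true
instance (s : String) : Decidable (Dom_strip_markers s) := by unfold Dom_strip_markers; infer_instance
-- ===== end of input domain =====

-- B replaces A's repeated string re-slicing (one slice per stripped marker) with two
-- index pointers and a single final slice; objective: alternative/faster mechanism.

-- ===== PORT A =====
-- A's first while-loop: peel '\b' / '^' off the front, one slice per iteration.
def pvLeadA (content : List Char) : List Char :=
  if PySem.Chars.startswith content ['\\', 'b'] then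
    pvLeadA (PySem.List.slice content (some 2) none)
  else if PySem.Chars.startswith content ['^'] then
    pvLeadA (PySem.List.slice content (some 1) none)
  else content
termination_by content.length
decreasing_by
  all_goals
    rw [PySem.List.slice_from _ (by omega)]
    simp_all [PySem.Chars.startswith, List.isPrefixOf_iff_prefix]
    have := List.IsPrefix.length_le ‹_ <+: content›
    simp_all; omega

-- A's second while-loop: peel '\b' / '$' off the back, one slice per iteration.
def pvTailA (content : List Char) : List Char :=
  if PySem.Chars.endswith content ['\\', 'b'] then
    pvTailA (PySem.List.slice content none (some (-2)))
  else if PySem.Chars.endswith content ['$'] then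
    pvTailA (PySem.List.slice content none (some (-1)))
  else content
termination_by content.length
decreasing_by
  · simp_all [PySem.Chars.endswith, List.isSuffixOf_iff_suffix]
    rw [PySem.List.slice_to_neg_ofNat content 2 (by omega)]
    have := List.IsSuffix.length_le ‹['\\', 'b'] <:+ content›
    simp at this ⊢; omega
  · simp_all [PySem.Chars.endswith, List.isSuffixOf_iff_suffix]
    rw [PySem.List.slice_to_neg_one]
    have := List.IsSuffix.length_le ‹['$'] <:+ content›
    simp at this ⊢; omega

def strip_markers (s : String) : String :=
  let t := PySem.Str.strip s
  if t.toList = [] then t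
  else
    let cs := t.toList
    let qc :=
      if PySem.Chars.startswith cs ['\''] && PySem.Chars.endswith cs ['\''] then
        (some '\'', PySem.List.slice cs (some 1) (some (-1)))
      else if PySem.Chars.startswith cs ['"'] && PySem.Chars.endswith cs ['"'] then
        (some '"', PySem.List.slice cs (some 1) (some (-1)))
      else (none, cs)
    let content := pvTailA (pvLeadA qc.2)
    match qc.1 with
    | some q => String.ofList ([q] ++ content ++ [q])
    | none =>
      if (['[', '{', '*', '&', '!', '|', '>', '-', '?', ':', '@', '`', '%']).any
          (fun c => PySem.Chars.startswith content [c]) then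
        String.ofList (['\''] ++ content ++ ['\''])
      else String.ofList content

-- ===== PORT B =====
-- B's first while-loop over an index: content.startswith('\b', i) is ported by hand
-- as the two code points at i and i+1 (exact: offset startswith on ASCII).
def pvLeadIdx (cs : List Char) (i : Nat) : Nat :=
  if PySem.List.pyGet? cs (i : Int) = some '\\' ∧ PySem.List.pyGet? cs ((i + 1 : Nat) : Int) = some 'b' then
    pvLeadIdx cs (i + 2)
  else if PySem.List.pyGet? cs (i : Int) = some '^' then
    pvLeadIdx cs (i + 1)
  else i
termination_by cs.length - i
decreasing_by
  · obtain ⟨-, h2⟩ := ‹_ ∧ _›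
    rw [PySem.List.pyGet?_natCast] at h2
    obtain ⟨hlt, -⟩ := List.getElem?_eq_some_iff.mp h2
    omega
  · have h := ‹PySem.List.pyGet? cs (↑i) = some '^'›
    rw [PySem.List.pyGet?_natCast] at h
    obtain ⟨hlt, -⟩ := List.getElem?_eq_some_iff.mp h
    omega

-- B's second while-loop over an index j moving down from len(content).
def pvTailIdx (cs : List Char) (i j : Nat) : Nat :=
  if 2 ≤ j - i ∧ PySem.List.slice cs (some ((j - 2 : Nat) : Int)) (some ((j : Nat) : Int)) = ['\\', 'b'] then
    pvTailIdx cs i (j - 2)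
  else if 1 ≤ j - i ∧ PySem.List.pyGet? cs ((j - 1 : Nat) : Int) = some '$' then
    pvTailIdx cs i (j - 1)
  else j
termination_by j
decreasing_by
  · omega
  · omega

def strip_markers_alt (s : String) : String :=
  let t := PySem.Str.strip s
  if t.toList = [] then t
  else
    let cs := t.toList
    -- s[0] and s[-1]: in range because cs is nonempty here
    let c0 := PySem.List.pyGetD cs 0 ' '
    let cl := PySem.List.pyGetD cs (-1) ' '
    let qc :=
      if c0 ∈ ['\'', '"'] ∧ c0 = cl then
        ([c0], PySem.List.slice cs (some 1) (some (-1)))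
      else ([], cs)
    let i := pvLeadIdx qc.2 0
    let j := pvTailIdx qc.2 i qc.2.length
    let content := PySem.List.slice qc.2 (some (i : Int)) (some (j : Int))
    if qc.1 ≠ [] then String.ofList (qc.1 ++ content ++ qc.1)
    else if content ≠ [] ∧ PySem.List.pyGetD content 0 ' ' ∈ "[{*&!|>-?:@`%".toList then
      String.ofList (['\''] ++ content ++ ['\''])
    else String.ofList content

-- ===== PRECONDITION & SPEC =====
def Spec_strip_markers (s : String) (out : String) : Prop := out = strip_markers_alt s
instance (s : String) (out : String) : Decidable (Spec_strip_markers s out) := by unfold Spec_strip_markers; infer_instance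

-- ===== CLAIM (what is proved, stated in full; the proofs are below) =====
def Claim_equal_strip_markers : Prop := ∀ (s : String), Dom_strip_markers s → Spec_strip_markers s (strip_markers s)

-- ===== LEMMAS AND PROOFS =====

theorem sw1' (t : List Char) (a : Char) :
    PySem.Chars.startswith t [a] = true ↔ t[0]? = some a := by
  cases t <;>
    simp [PySem.Chars.startswith, List.isPrefixOf_iff_prefix, List.cons_prefix_cons]
  exact eq_comm

theorem sw2' (t : List Char) (a b : Char) :
    PySem.Chars.startswith t [a, b] = true ↔ t[0]? = some a ∧ t[1]? = some b := by
  match t with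
  | [] => simp [PySem.Chars.startswith]
  | [x] => simp [PySem.Chars.startswith, List.isPrefixOf_iff_prefix, List.cons_prefix_cons]
  | x :: y :: r =>
    simp [PySem.Chars.startswith, List.isPrefixOf_iff_prefix, List.cons_prefix_cons]
    constructor <;> rintro ⟨p, q⟩ <;> exact ⟨p.symm, q.symm⟩

theorem ew1' (t : List Char) (a : Char) :
    PySem.Chars.endswith t [a] = true ↔ t.getLast? = some a := by
  simp [PySem.Chars.endswith, List.isSuffixOf_iff_suffix, List.IsSuffix,
    List.getLast?_eq_some_iff]
  constructor
  · rintro ⟨ys, h⟩; exact ⟨ys, h.symm⟩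
  · rintro ⟨ys, h⟩; exact ⟨ys, h.symm⟩

theorem ew2' (t : List Char) (a b : Char) :
    PySem.Chars.endswith t [a, b] = true ↔
      2 ≤ t.length ∧ t.drop (t.length - 2) = [a, b] := by
  simp only [PySem.Chars.endswith, List.isSuffixOf_iff_suffix, List.suffix_iff_eq_drop]
  constructor
  · intro h
    have hl := congrArg List.length h
    simp at hl
    exact ⟨by omega, h.symm⟩
  · rintro ⟨h1, h2⟩; exact h2.symm

theorem sw2_drop (cs : List Char) (i : Nat) (a b : Char) :
    PySem.Chars.startswith (cs.drop i) [a, b] = true ↔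
      PySem.List.pyGet? cs (i : Int) = some a ∧ PySem.List.pyGet? cs ((i + 1 : Nat) : Int) = some b := by
  rw [sw2', PySem.List.pyGet?_natCast, PySem.List.pyGet?_natCast]
  have h0 : (cs.drop i)[0]? = cs[i]? := by simpa using List.getElem?_drop (xs := cs) (i := i) (j := 0)
  have h1 : (cs.drop i)[1]? = cs[i + 1]? := List.getElem?_drop
  rw [h0, h1]

theorem sw1_drop (cs : List Char) (i : Nat) (a : Char) :
    PySem.Chars.startswith (cs.drop i) [a] = true ↔
      PySem.List.pyGet? cs (i : Int) = some a := by
  rw [sw1', PySem.List.pyGet?_natCast]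
  have h0 : (cs.drop i)[0]? = cs[i]? := by simpa using List.getElem?_drop (xs := cs) (i := i) (j := 0)
  rw [h0]

theorem tail_cond2 (cs : List Char) (i j : Nat) (hj : j ≤ cs.length) :
    PySem.Chars.endswith ((cs.drop i).take (j - i)) ['\\', 'b'] = true ↔
      (2 ≤ j - i ∧ PySem.List.slice cs (some ((j - 2 : Nat) : Int)) (some ((j : Nat) : Int)) = ['\\', 'b']) := by
  have ht : ((cs.drop i).take (j - i)).length = j - i := by
    simp [List.length_take, List.length_drop]; omega
  rw [ew2', ht, PySem.List.slice_natCast, List.drop_take, List.drop_drop]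
  by_cases hc : 2 ≤ j - i
  · have e1 : i + (j - i - 2) = j - 2 := by omega
    have e2 : j - i - (j - i - 2) = 2 := by omega
    have e3 : j - (j - 2) = 2 := by omega
    rw [e1, e2, e3]
  · simp [hc]

theorem tail_cond1 (cs : List Char) (i j : Nat) (hj : j ≤ cs.length) :
    PySem.Chars.endswith ((cs.drop i).take (j - i)) ['$'] = true ↔
      (1 ≤ j - i ∧ PySem.List.pyGet? cs ((j - 1 : Nat) : Int) = some '$') := by
  have ht : ((cs.drop i).take (j - i)).length = j - i := by
    simp [List.length_take, List.length_drop]; omega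
  rw [ew1', PySem.List.pyGet?_natCast, List.getLast?_eq_getElem?, ht]
  by_cases hc : 1 ≤ j - i
  · rw [List.getElem?_take_of_lt (by omega), List.getElem?_drop]
    have e1 : i + (j - i - 1) = j - 1 := by omega
    rw [e1]
    simp [hc]
  · have hz : j - i = 0 := by omega
    simp [hz]

theorem pvLeadIdx_le (cs : List Char) (i : Nat) :
    i ≤ pvLeadIdx cs i ∧ (i ≤ cs.length → pvLeadIdx cs i ≤ cs.length) := by
  fun_induction pvLeadIdx cs i with
  | case1 i h ih =>
    obtain ⟨-, h2⟩ := h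
    rw [PySem.List.pyGet?_natCast] at h2
    obtain ⟨hlt, -⟩ := List.getElem?_eq_some_iff.mp h2
    exact ⟨by omega, fun _ => ih.2 (by omega)⟩
  | case2 i _ h ih =>
    rw [PySem.List.pyGet?_natCast] at h
    obtain ⟨hlt, -⟩ := List.getElem?_eq_some_iff.mp h
    exact ⟨by omega, fun _ => ih.2 (by omega)⟩
  | case3 i h1 h2 => exact ⟨le_refl _, fun h => h⟩

theorem pvLeadA_eq (cs : List Char) (i : Nat) :
    pvLeadA (cs.drop i) = cs.drop (pvLeadIdx cs i) := by
  fun_induction pvLeadIdx cs i with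
  | case1 i h ih =>
    obtain ⟨h1, h2⟩ := h
    have h1' := h1; have h2' := h2
    rw [PySem.List.pyGet?_natCast] at h1' h2'
    obtain ⟨hlt1, he1⟩ := List.getElem?_eq_some_iff.mp h1'
    obtain ⟨hlt2, he2⟩ := List.getElem?_eq_some_iff.mp h2'
    have e : cs.drop i = '\\' :: 'b' :: cs.drop (i + 2) := by
      rw [List.drop_eq_getElem_cons (by omega), List.drop_eq_getElem_cons (l := cs) (i := i + 1) (by omega)]
      simp [he1, he2]
    rw [pvLeadA, if_pos, PySem.List.slice_from _ (by omega)]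
    · rw [e]; simpa using ih
    · rw [e, sw2']; simp
  | case2 i h1 h ih =>
    have h' := h
    rw [PySem.List.pyGet?_natCast] at h'
    obtain ⟨hlt, he⟩ := List.getElem?_eq_some_iff.mp h'
    have e : cs.drop i = '^' :: cs.drop (i + 1) := by
      rw [List.drop_eq_getElem_cons (by omega)]; simp [he]
    rw [pvLeadA, if_neg, if_pos, PySem.List.slice_from _ (by omega)]
    · rw [e]; simpa using ih
    · rw [e, sw1']; simp
    · rw [sw2_drop]; exact h1
  | case3 i h1 h2 =>
    rw [pvLeadA, if_neg, if_neg]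
    · rw [sw1_drop]; exact h2
    · rw [sw2_drop]; exact h1

theorem pvTailIdx_le (cs : List Char) (i j : Nat) :
    pvTailIdx cs i j ≤ j ∧ (i ≤ j → i ≤ pvTailIdx cs i j) := by
  fun_induction pvTailIdx cs i j with
  | case1 j h ih => exact ⟨by omega, fun _ => ih.2 (by omega)⟩
  | case2 j h1 h ih => exact ⟨by omega, fun _ => ih.2 (by omega)⟩
  | case3 j h1 h2 => exact ⟨le_refl _, fun h => h⟩

theorem pvTailA_eq (cs : List Char) (i j : Nat) (hj : j ≤ cs.length) :
    pvTailA ((cs.drop i).take (j - i)) = (cs.drop i).take (pvTailIdx cs i j - i) := by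
  fun_induction pvTailIdx cs i j with
  | case1 j h ih =>
    have hew : PySem.Chars.endswith ((cs.drop i).take (j - i)) ['\\', 'b'] = true :=
      (tail_cond2 cs i j hj).mpr h
    have ht : ((cs.drop i).take (j - i)).length = j - i := by
      simp [List.length_take, List.length_drop]; omega
    rw [pvTailA, if_pos hew]
    rw [PySem.List.slice_to_neg_ofNat _ 2 (by omega), ht, List.take_take]
    have e : min (j - i - 2) (j - i) = j - 2 - i := by omega
    rw [e]
    exact ih (by omega)
  | case2 j h1 h ih =>
    have hew1 : ¬ PySem.Chars.endswith ((cs.drop i).take (j - i)) ['\\', 'b'] = true := by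
      rw [tail_cond2 cs i j hj]; exact h1
    have hew2 : PySem.Chars.endswith ((cs.drop i).take (j - i)) ['$'] = true :=
      (tail_cond1 cs i j hj).mpr h
    have ht : ((cs.drop i).take (j - i)).length = j - i := by
      simp [List.length_take, List.length_drop]; omega
    rw [pvTailA, if_neg hew1, if_pos hew2]
    rw [PySem.List.slice_to_neg_one, List.dropLast_eq_take, ht, List.take_take]
    have e : min (j - i - 1) (j - i) = j - 1 - i := by omega
    rw [e]
    exact ih (by omega)
  | case3 j h1 h2 =>
    rw [pvTailA, if_neg, if_neg]
    · rw [tail_cond1 cs i j hj]; exact h2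
    · rw [tail_cond2 cs i j hj]; exact h1

theorem pvCore (t : List Char) :
    pvTailA (pvLeadA t) =
      PySem.List.slice t (some ((pvLeadIdx t 0 : Nat) : Int))
        (some ((pvTailIdx t (pvLeadIdx t 0) t.length : Nat) : Int)) := by
  have hA : pvLeadA t = t.drop (pvLeadIdx t 0) := by
    have := pvLeadA_eq t 0; simpa using this
  have hi : pvLeadIdx t 0 ≤ t.length := (pvLeadIdx_le t 0).2 (Nat.zero_le _)
  have hfull : t.drop (pvLeadIdx t 0) = (t.drop (pvLeadIdx t 0)).take (t.length - pvLeadIdx t 0) := by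
    rw [List.take_of_length_le]; simp
  rw [hA, PySem.List.slice_natCast, hfull, pvTailA_eq t (pvLeadIdx t 0) t.length (le_refl _),
    List.take_take]
  congr 1
  have := (pvTailIdx_le t (pvLeadIdx t 0) t.length).1
  omega

theorem guard_eq (content : List Char) :
    ((['[', '{', '*', '&', '!', '|', '>', '-', '?', ':', '@', '`', '%']).any
        (fun c => PySem.Chars.startswith content [c]) = true)
      ↔ (content ≠ [] ∧ PySem.List.pyGetD content 0 ' ' ∈ "[{*&!|>-?:@`%".toList) := by
  cases content with
  | nil => simp [PySem.Chars.startswith, List.isPrefixOf]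
  | cons h t =>
    have hs : "[{*&!|>-?:@`%".toList = ['[', '{', '*', '&', '!', '|', '>', '-', '?', ':', '@', '`', '%'] := by decide
    have hsw : ∀ c : Char, PySem.Chars.startswith (h :: t) [c] = true ↔ c = h := by
      intro c
      simp [PySem.Chars.startswith, List.isPrefixOf_iff_prefix, List.cons_prefix_cons]
    simp [hsw, hs, PySem.List.pyGetD_zero_cons]
    constructor <;>
      (intro h'; rcases h' with h' | h' | h' | h' | h' | h' | h' | h' | h' | h' | h' | h' | h' <;>
        subst h' <;> simp)

theorem noquote_eq (cs : List Char) :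
    (if (['[', '{', '*', '&', '!', '|', '>', '-', '?', ':', '@', '`', '%']).any
        (fun c => PySem.Chars.startswith (pvTailA (pvLeadA cs)) [c]) = true
      then String.ofList (['\''] ++ pvTailA (pvLeadA cs) ++ ['\''])
      else String.ofList (pvTailA (pvLeadA cs)))
    =
    (if PySem.List.slice cs (some ((pvLeadIdx cs 0 : Nat) : Int))
          (some ((pvTailIdx cs (pvLeadIdx cs 0) cs.length : Nat) : Int)) ≠ [] ∧
        PySem.List.pyGetD (PySem.List.slice cs (some ((pvLeadIdx cs 0 : Nat) : Int))
          (some ((pvTailIdx cs (pvLeadIdx cs 0) cs.length : Nat) : Int))) 0 ' '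
          ∈ "[{*&!|>-?:@`%".toList
      then String.ofList (['\''] ++ PySem.List.slice cs (some ((pvLeadIdx cs 0 : Nat) : Int))
          (some ((pvTailIdx cs (pvLeadIdx cs 0) cs.length : Nat) : Int)) ++ ['\''])
      else String.ofList (PySem.List.slice cs (some ((pvLeadIdx cs 0 : Nat) : Int))
          (some ((pvTailIdx cs (pvLeadIdx cs 0) cs.length : Nat) : Int)))) := by
  rw [← pvCore]
  by_cases hgd : (['[', '{', '*', '&', '!', '|', '>', '-', '?', ':', '@', '`', '%']).any
      (fun c => PySem.Chars.startswith (pvTailA (pvLeadA cs)) [c]) = true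
  · rw [if_pos hgd, if_pos (by rw [← guard_eq]; exact hgd)]
  · rw [if_neg hgd, if_neg (by rw [← guard_eq]; exact hgd)]

theorem strip_eq (s : String) : strip_markers s = strip_markers_alt s := by
  simp only [strip_markers, strip_markers_alt]
  generalize (PySem.Str.strip s) = t
  by_cases h0 : t.toList = []
  · simp [h0]
  · rw [if_neg h0, if_neg h0]
    obtain ⟨a, r, hcs⟩ := List.exists_cons_of_ne_nil h0
    rw [hcs]
    have hg0 : PySem.List.pyGetD (a :: r) 0 ' ' = a := PySem.List.pyGetD_zero_cons a r ' '
    have hgl : PySem.List.pyGetD (a :: r) (-1) ' ' = (a :: r).getLast (List.cons_ne_nil a r) :=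
      PySem.List.pyGetD_neg_one (a :: r) ' ' (List.cons_ne_nil a r)
    have hswq : ∀ q : Char, PySem.Chars.startswith (a :: r) [q] = true ↔ q = a := by
      intro q; rw [sw1']; simp; exact eq_comm
    have hewq : ∀ q : Char, PySem.Chars.endswith (a :: r) [q] = true ↔
        (a :: r).getLast (List.cons_ne_nil a r) = q := by
      intro q
      rw [ew1', List.getLast?_eq_some_getLast (List.cons_ne_nil a r)]
      simp
    have hB1 : ∀ q : Char, q ∈ (['\'', '"'] : List Char) → a = q →
        (a :: r).getLast (List.cons_ne_nil a r) = q →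
        (PySem.List.pyGetD (a :: r) 0 ' ' ∈ (['\'', '"'] : List Char) ∧
          PySem.List.pyGetD (a :: r) 0 ' ' = PySem.List.pyGetD (a :: r) (-1) ' ') := by
      intro q hq ha hl
      refine ⟨by rw [hg0, ha]; exact hq, by rw [hg0, hgl]; exact ha.trans hl.symm⟩
    by_cases hA1 : a = '\'' ∧ (a :: r).getLast (List.cons_ne_nil a r) = '\''
    · rw [if_pos (show (PySem.Chars.startswith (a :: r) ['\''] &&
            PySem.Chars.endswith (a :: r) ['\'']) = true by
          rw [Bool.and_eq_true, hswq, hewq]; exact ⟨hA1.1.symm, hA1.2⟩)]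
      rw [if_pos (hB1 '\'' (by simp) hA1.1 hA1.2)]
      simp [pvCore, hA1.1]
    · by_cases hA2 : a = '"' ∧ (a :: r).getLast (List.cons_ne_nil a r) = '"'
      · rw [if_neg (show ¬ (PySem.Chars.startswith (a :: r) ['\''] &&
              PySem.Chars.endswith (a :: r) ['\'']) = true by
            rw [Bool.and_eq_true, hswq, hewq]; rintro ⟨p, q⟩; exact hA1 ⟨p.symm, q⟩)]
        rw [if_pos (show (PySem.Chars.startswith (a :: r) ['"'] &&
              PySem.Chars.endswith (a :: r) ['"']) = true by
            rw [Bool.and_eq_true, hswq, hewq]; exact ⟨hA2.1.symm, hA2.2⟩)]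
        rw [if_pos (hB1 '"' (by simp) hA2.1 hA2.2)]
        simp [pvCore, hA2.1]
      · rw [if_neg (show ¬ (PySem.Chars.startswith (a :: r) ['\''] &&
              PySem.Chars.endswith (a :: r) ['\'']) = true by
            rw [Bool.and_eq_true, hswq, hewq]; rintro ⟨p, q⟩; exact hA1 ⟨p.symm, q⟩)]
        rw [if_neg (show ¬ (PySem.Chars.startswith (a :: r) ['"'] &&
              PySem.Chars.endswith (a :: r) ['"']) = true by
            rw [Bool.and_eq_true, hswq, hewq]; rintro ⟨p, q⟩; exact hA2 ⟨p.symm, q⟩)]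
        rw [if_neg (show ¬ (PySem.List.pyGetD (a :: r) 0 ' ' ∈ (['\'', '"'] : List Char) ∧
              PySem.List.pyGetD (a :: r) 0 ' ' = PySem.List.pyGetD (a :: r) (-1) ' ') by
          rw [hg0, hgl]
          rintro ⟨hm, he⟩
          simp at hm
          rcases hm with hm | hm
          · exact hA1 ⟨hm, by rw [← he, hm]⟩
          · exact hA2 ⟨hm, by rw [← he, hm]⟩)]
        simp only []
        exact noquote_eq (a :: r)

-- ===== VERDICT (by name: the statement is the Claim_ definition above) =====
theorem strip_markers_spec : Claim_equal_strip_markers := by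
  intro s _
  unfold Spec_strip_markers
  exact strip_eq s
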